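-- pv_equiv track=rewrite | github.com/devsaaqib/Virtusa_PreOnBoarding_Training-Saaqib- | Python/Week-2/MultiOperationListEngine.py | MultiOperationListEngine
-- ===== SOURCE A (Python) =====
-- def MultiOperationListEngine(input_list, k):
--     # Rotate the list by k positions
--     k = k % len(input_list)  # Handle cases where k > len(input_list)
--     rotated_list = input_list[-k:] + input_list[:-k]
--
--     # Remove duplicates while preserving order
--     seen = set()
--     unique_list = []
--     for item in rotated_list:
--         if item not in seen:
--             seen.add(item)
--             unique_list.append(item)
--
--     # Split into even and odd lists
--     even_list = [x for x in unique_list if x % 2 == 0]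
--     odd_list = [x for x in unique_list if x % 2 != 0]
--
--     return even_list, odd_list
-- ===== SOURCE B (Python) =====
-- def MultiOperationListEngine(input_list, k):
--     # Rotate by index arithmetic instead of slicing: rotated[i] = input_list[(i - k) % n]
--     n = len(input_list)
--     k = k % n  # empty input still raises ZeroDivisionError, as in the original
--     rotated = [input_list[(i - k) % n] for i in range(n)]
--     # Count occurrences once, then scan the rotated list BACKWARD, decrementing the
--     # count of each element; the count hits zero exactly at an element's first
--     # occurrence, so those are the kept ones.  The backward scan appends, and the
--     # buckets are reversed at the end to restore first-occurrence order.
--     counts = {}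
--     for x in rotated:
--         counts[x] = counts.get(x, 0) + 1
--     even_rev = []
--     odd_rev = []
--     for i in range(n - 1, -1, -1):
--         x = rotated[i]
--         counts[x] -= 1
--         if counts[x] == 0:
--             if x % 2 == 0:
--                 even_rev.append(x)
--             else:
--                 odd_rev.append(x)
--     even_rev.reverse()
--     odd_rev.reverse()
--     return even_rev, odd_rev
-- ===== Notes on version B (the rewrite author's own statement) =====
-- stated objective: alternative
-- what changed: B rotates by index arithmetic (input_list[(i-k)%n]) instead of slicing, and replaces the seen-set dedup pass plus two filter comprehensions by an occurrence-counting dict and one backward scan that keeps an element exactly when its remaining count reaches zero (its first occurrence), routing it straight to its parity bucket and reversing the buckets at the end.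
import Mathlib
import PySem

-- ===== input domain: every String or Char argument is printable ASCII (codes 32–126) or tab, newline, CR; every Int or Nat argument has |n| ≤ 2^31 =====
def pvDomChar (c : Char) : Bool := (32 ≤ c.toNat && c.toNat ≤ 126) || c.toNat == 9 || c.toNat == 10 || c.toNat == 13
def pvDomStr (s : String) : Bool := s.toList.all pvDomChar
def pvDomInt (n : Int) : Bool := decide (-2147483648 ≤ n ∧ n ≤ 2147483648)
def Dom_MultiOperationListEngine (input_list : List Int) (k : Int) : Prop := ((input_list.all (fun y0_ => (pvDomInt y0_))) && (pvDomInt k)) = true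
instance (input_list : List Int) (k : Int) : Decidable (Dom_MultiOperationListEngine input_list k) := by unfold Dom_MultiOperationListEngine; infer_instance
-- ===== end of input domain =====

-- B replaces A's slice-rotation + seen-set dedup scan + two filter passes by index-arithmetic
-- rotation, an occurrence-counting dict, and one backward scan that keeps an element exactly
-- when its remaining count reaches zero (its first occurrence), routing it straight to its
-- parity bucket (alternative decomposition, not faster).

-- ===== PORT A =====
def MultiOperationListEngine (input_list : List Int) (k : Int) : List Int × List Int :=
  let k' := PySem.Int.mod k (input_list.length : Int)
  let rotated := PySem.List.slice input_list (some (-k')) none ++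
                 PySem.List.slice input_list none (some (-k'))
  let su := rotated.foldl
    (fun (su : PySem.Set Int × List Int) item =>
      if PySem.Set.contains su.1 item then su
      else (PySem.Set.add su.1 item, su.2 ++ [item]))
    (PySem.Set.empty, [])
  (su.2.filter (fun x => PySem.Int.mod x 2 == 0),
   su.2.filter (fun x => PySem.Int.mod x 2 != 0))

-- ===== PORT B =====
def MultiOperationListEngine_alt (input_list : List Int) (k : Int) : List Int × List Int :=
  let n : Int := input_list.length
  let k' := PySem.Int.mod k n
  -- rotated[i] = input_list[(i - k) % n]; the index is always in range, so pyGetD is exact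
  let rotated := (PySem.List.pyRange 0 n 1).map
    (fun i => PySem.List.pyGetD input_list (PySem.Int.mod (i - k') n) 0)
  let counts := rotated.foldl
    (fun (d : PySem.Dict Int Int) x => d.insert x (d.getD x 0 + 1)) PySem.Dict.empty
  -- 'counts[x] -= 1' reads an always-present key, so getD is exact here
  let st := (PySem.List.pyRange (n - 1) (-1) (-1)).foldl
    (fun (st : PySem.Dict Int Int × List Int × List Int) i =>
      if (st.1.insert (PySem.List.pyGetD rotated i 0)
            (st.1.getD (PySem.List.pyGetD rotated i 0) 0 - 1)).getD
            (PySem.List.pyGetD rotated i 0) 0 == 0 then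
        if PySem.Int.mod (PySem.List.pyGetD rotated i 0) 2 == 0 then
          (st.1.insert (PySem.List.pyGetD rotated i 0)
             (st.1.getD (PySem.List.pyGetD rotated i 0) 0 - 1),
           st.2.1 ++ [PySem.List.pyGetD rotated i 0], st.2.2)
        else
          (st.1.insert (PySem.List.pyGetD rotated i 0)
             (st.1.getD (PySem.List.pyGetD rotated i 0) 0 - 1),
           st.2.1, st.2.2 ++ [PySem.List.pyGetD rotated i 0])
      else
        (st.1.insert (PySem.List.pyGetD rotated i 0)
           (st.1.getD (PySem.List.pyGetD rotated i 0) 0 - 1),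
         st.2.1, st.2.2))
    (counts, [], [])
  (st.2.1.reverse, st.2.2.reverse)

-- ===== PRECONDITION & SPEC =====
-- Pre_ excludes only the empty list, on which Python's 'k % len(input_list)' raises ZeroDivisionError in both A and B.
def Pre_MultiOperationListEngine (input_list : List Int) (k : Int) : Prop := input_list ≠ []
instance (input_list : List Int) (k : Int) : Decidable (Pre_MultiOperationListEngine input_list k) := by unfold Pre_MultiOperationListEngine; infer_instance
def pvWitness_MultiOperationListEngine : List Int × Int := ([3, 1, 2, 2, 4, 3], 2)

def Spec_MultiOperationListEngine (input_list : List Int) (k : Int) (out : List Int × List Int) : Prop := out = MultiOperationListEngine_alt input_list k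
instance (input_list : List Int) (k : Int) (out : List Int × List Int) : Decidable (Spec_MultiOperationListEngine input_list k out) := by unfold Spec_MultiOperationListEngine; infer_instance

-- ===== CLAIM (what is proved, stated in full; the proofs are below) =====
def Claim_equal_MultiOperationListEngine : Prop := ∀ (input_list : List Int) (k : Int), Dom_MultiOperationListEngine input_list k → Pre_MultiOperationListEngine input_list k → Spec_MultiOperationListEngine input_list k (MultiOperationListEngine input_list k)

-- ===== LEMMAS AND PROOFS =====

-- A's seen set only grows by appending, so the start set is a prefix of the final set.
theorem prefix_foldl_add (R : List Int) (s : PySem.Set Int) :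
    s <+: R.foldl PySem.Set.add s := by
  induction R generalizing s with
  | nil => exact List.prefix_rfl
  | cons x R ih =>
    refine List.IsPrefix.trans ?_ (ih (PySem.Set.add s x))
    unfold PySem.Set.add
    split
    · exact List.prefix_rfl
    · exact ⟨[x], rfl⟩

-- A's fold from any state: the set becomes foldl Set.add, and the unique list receives exactly
-- the freshly appended tail of that set.
theorem aFold_eq (R : List Int) (s u : List Int) :
    R.foldl
      (fun (su : PySem.Set Int × List Int) item =>
        if PySem.Set.contains su.1 item then su
        else (PySem.Set.add su.1 item, su.2 ++ [item])) (s, u)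
    = (R.foldl PySem.Set.add s, u ++ (R.foldl PySem.Set.add s).drop s.length) := by
  induction R generalizing s u with
  | nil => simp
  | cons x R ih =>
    simp only [List.foldl]
    cases hc : PySem.Set.contains s x with
    | true =>
      rw [if_pos rfl]
      have hadd : PySem.Set.add s x = s := by unfold PySem.Set.add; rw [hc]; simp
      rw [ih s u, hadd]
    | false =>
      rw [if_neg (by decide)]
      have hadd : PySem.Set.add s x = s ++ [x] := by unfold PySem.Set.add; rw [hc]; simp
      rw [hadd]
      rw [ih (s ++ [x]) (u ++ [x])]
      obtain ⟨t, ht⟩ := prefix_foldl_add R (s ++ [x])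
      rw [← ht]
      have h1 : ((s ++ [x]) ++ t).drop (s ++ [x]).length = t := List.drop_left
      have h2 : ((s ++ [x]) ++ t).drop s.length = x :: t := by
        rw [List.append_assoc]
        simp
      simp only [h1, h2]
      simp [List.append_assoc]

-- A's dedup fold over R started empty produces PySem.List.dedup R in both components.
theorem aFold_dedup (R : List Int) :
    R.foldl
      (fun (su : PySem.Set Int × List Int) item =>
        if PySem.Set.contains su.1 item then su
        else (PySem.Set.add su.1 item, su.2 ++ [item])) (PySem.Set.empty, [])
    = (PySem.List.dedup R, PySem.List.dedup R) := by
  have h := aFold_eq R PySem.Set.empty []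
  simpa [PySem.List.dedup, PySem.Set.ofList, PySem.Set.empty] using h

-- dedup of one more element: kept iff not already present.
theorem dedup_append_singleton (l : List Int) (x : Int) :
    PySem.List.dedup (l ++ [x])
      = if x ∈ l then PySem.List.dedup l else PySem.List.dedup l ++ [x] := by
  have h1 : PySem.List.dedup (l ++ [x]) = PySem.Set.add (PySem.List.dedup l) x := by
    simp [PySem.List.dedup, PySem.Set.ofList, List.foldl_append]
  rw [h1]
  unfold PySem.Set.add PySem.Set.contains
  by_cases hx : x ∈ l
  · simp [hx]
  · simp [hx]

-- B's backward scan over the first j positions of R, started with a dict holding the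
-- occurrence counts of take j R, appends exactly the first occurrences (= dedup (take j R)),
-- in reverse order, split by parity.
theorem bLoop_eq (R : List Int) (j : Nat) (hj : j ≤ R.length) (d : PySem.Dict Int Int)
    (hd : ∀ v : Int, d.getD v 0 = ((R.take j).count v : Int)) (e o : List Int) :
    ((PySem.List.pyRange ((j : Int) - 1) (-1) (-1)).foldl
      (fun (st : PySem.Dict Int Int × List Int × List Int) i =>
        if (st.1.insert (PySem.List.pyGetD R i 0)
              (st.1.getD (PySem.List.pyGetD R i 0) 0 - 1)).getD
              (PySem.List.pyGetD R i 0) 0 == 0 then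
          if PySem.Int.mod (PySem.List.pyGetD R i 0) 2 == 0 then
            (st.1.insert (PySem.List.pyGetD R i 0)
               (st.1.getD (PySem.List.pyGetD R i 0) 0 - 1),
             st.2.1 ++ [PySem.List.pyGetD R i 0], st.2.2)
          else
            (st.1.insert (PySem.List.pyGetD R i 0)
               (st.1.getD (PySem.List.pyGetD R i 0) 0 - 1),
             st.2.1, st.2.2 ++ [PySem.List.pyGetD R i 0])
        else
          (st.1.insert (PySem.List.pyGetD R i 0)
             (st.1.getD (PySem.List.pyGetD R i 0) 0 - 1),
           st.2.1, st.2.2))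
      (d, e, o)).2
    = (e ++ ((PySem.List.dedup (R.take j)).filter (fun x => PySem.Int.mod x 2 == 0)).reverse,
       o ++ ((PySem.List.dedup (R.take j)).filter (fun x => PySem.Int.mod x 2 != 0)).reverse) := by
  induction j generalizing d e o with
  | zero =>
    rw [PySem.List.pyRange_neg_one_eq_nil (by norm_num)]
    simp [PySem.List.dedup, PySem.Set.ofList, PySem.Set.empty]
  | succ j ih =>
    have hjR : j < R.length := by omega
    have hcast : (((j + 1 : Nat)) : Int) - 1 = (j : Int) := by push_cast; ring
    rw [hcast, PySem.List.pyRange_neg_one_cons (by omega)]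
    simp only [List.foldl]
    have hx : PySem.List.pyGetD R (j : Int) 0 = R[j] := by
      rw [PySem.List.pyGetD_eq_getElem R 0 (by omega) (by exact_mod_cast hjR)]
      simp
    have htake : R.take (j + 1) = R.take j ++ [R[j]] := by
      rw [List.take_add_one]
      simp [List.getElem?_eq_getElem hjR]
    simp only [hx]
    have hcc : (R.take (j + 1)).count R[j] = (R.take j).count R[j] + 1 := by
      rw [htake, List.count_append]
      simp
    have hgetd : d.getD R[j] 0 = ((R.take j).count R[j] : Int) + 1 := by
      rw [hd R[j], hcc]
      push_cast
      ring
    have hdx : (d.insert R[j] (d.getD R[j] 0 - 1)).getD R[j] 0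
        = ((R.take j).count R[j] : Int) := by
      rw [PySem.Dict.getD_insert_self, hgetd]
      ring
    have hd' : ∀ v : Int,
        (d.insert R[j] (d.getD R[j] 0 - 1)).getD v 0 = ((R.take j).count v : Int) := by
      intro v
      by_cases hv : v = R[j]
      · rw [hv]; exact hdx
      · rw [PySem.Dict.getD_insert, if_neg hv, hd v]
        have hcv : (R.take (j + 1)).count v = (R.take j).count v := by
          rw [htake, List.count_append]
          simp [Ne.symm hv]
        rw [hcv]
    have hmod2 : PySem.Int.mod R[j] 2 = R[j] % 2 :=
      PySem.Int.mod_eq_emod_of_pos (by norm_num)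
    by_cases hm : R[j] ∈ R.take j
    · have hpos : 0 < (R.take j).count R[j] := List.count_pos_iff.mpr hm
      have hcnt : ¬ ((d.insert R[j] (d.getD R[j] 0 - 1)).getD R[j] 0 == 0) = true := by
        rw [hdx]
        simp
        omega
      rw [if_neg hcnt]
      rw [ih (by omega) _ hd' e o, htake, dedup_append_singleton, if_pos hm]
    · have h0 : (R.take j).count R[j] = 0 := List.count_eq_zero.mpr hm
      have hcnt : ((d.insert R[j] (d.getD R[j] 0 - 1)).getD R[j] 0 == 0) = true := by
        rw [hdx, h0]
        simp
      rw [if_pos hcnt]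
      rw [htake, dedup_append_singleton, if_neg hm]
      by_cases hp : (PySem.Int.mod R[j] 2 == 0) = true
      · rw [if_pos hp, ih (by omega) _ hd' (e ++ [R[j]]) o]
        have h2 : R[j] % 2 = 0 := by rw [← hmod2]; exact beq_iff_eq.mp hp
        simp [List.filter_append, h2]
      · rw [if_neg hp, ih (by omega) _ hd' e (o ++ [R[j]])]
        have h2 : R[j] % 2 = 1 := by
          rcases Int.emod_two_eq_zero_or_one R[j] with h | h
          · exact absurd (by rw [hmod2, h] : PySem.Int.mod R[j] 2 = 0) (by simpa using hp)
          · exact h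
        simp [List.filter_append, h2]

-- The two rotations agree: index arithmetic (i - k') % n lands exactly where slicing puts it.
theorem rot_eq (input_list : List Int) (k' : Int)
    (hne : input_list ≠ []) (h0 : 0 ≤ k') (hlt : k' < (input_list.length : Int)) :
    (PySem.List.pyRange 0 (input_list.length : Int) 1).map
      (fun i => PySem.List.pyGetD input_list (PySem.Int.mod (i - k') (input_list.length : Int)) 0)
    = input_list.drop (input_list.length - k'.toNat) ++ input_list.take (input_list.length - k'.toNat) := by
  set n := input_list.length with hn
  have hnpos : 0 < n := List.length_pos_iff.mpr hne
  set c := k'.toNat with hc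
  have hck : (c : Int) = k' := Int.toNat_of_nonneg h0
  have hcn : c < n := by omega
  apply List.ext_getElem
  · simp [PySem.List.length_pyRange_one]
    omega
  · intro j hj1 hj2
    have hjn : j < n := by
      simpa [PySem.List.length_pyRange_one] using hj1
    rw [List.getElem_map, PySem.List.getElem_pyRange_one 0 (n : Int) j
      (by simpa [PySem.List.length_pyRange_one] using hj1)]
    have hmod : PySem.Int.mod ((0 + (j : Int)) - k') (n : Int)
        = if j < c then ((j : Int) - c + n) else ((j : Int) - c) := by
      rw [PySem.Int.mod_eq_emod_of_pos (by exact_mod_cast hnpos)]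
      by_cases hjc : j < c
      · rw [if_pos hjc]
        have hsplit : (0 + (j : Int)) - k' = ((j : Int) - c + n) + (n : Int) * (-1) := by
          rw [← hck]; ring
        rw [hsplit, Int.add_mul_emod_self_left]
        exact Int.emod_eq_of_lt (by omega) (by omega)
      · rw [if_neg hjc,
            show (0 + (j : Int)) - k' = ((j : Int) - c) from by rw [← hck]; ring]
        exact Int.emod_eq_of_lt (by omega) (by omega)
    rw [hmod]
    by_cases hjc : j < c
    · rw [if_pos hjc]
      rw [PySem.List.pyGetD_eq_getElem input_list 0 (by omega) (by omega)]
      rw [List.getElem_append_left (by simp [hn]; omega)]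
      rw [List.getElem_drop]
      congr 1
      omega
    · rw [if_neg hjc]
      rw [PySem.List.pyGetD_eq_getElem input_list 0 (by omega) (by omega)]
      rw [List.getElem_append_right (by simp [hn]; omega)]
      rw [List.getElem_take]
      congr 1
      simp [hn]
      omega

-- A's slice pair is the same drop/take decomposition.
theorem sliceRot_eq (input_list : List Int) (k' : Int)
    (h0 : 0 ≤ k') (hlt : k' < (input_list.length : Int)) :
    PySem.List.slice input_list (some (-k')) none ++
      PySem.List.slice input_list none (some (-k'))
    = input_list.drop (input_list.length - k'.toNat) ++ input_list.take (input_list.length - k'.toNat) := by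
  rcases Nat.eq_zero_or_pos k'.toNat with hz | hpos
  · have hk0 : k' = 0 := by omega
    subst hk0
    have h2 : PySem.List.slice input_list none (some (0 : Int)) = [] := by
      simpa using PySem.List.slice_to_natCast input_list 0
    simp [h2, PySem.List.slice_none_none]
  · have hck : (-k') = (-(k'.toNat : Int)) := by
      rw [Int.toNat_of_nonneg h0]
    rw [hck, PySem.List.slice_from_neg_natCast input_list k'.toNat hpos,
        PySem.List.slice_to_neg_natCast input_list k'.toNat hpos]

-- ===== VERDICT (by name: the statement is the Claim_ definition above) =====
theorem MultiOperationListEngine_spec : Claim_equal_MultiOperationListEngine := by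
  intro input_list k _ hpre
  unfold Spec_MultiOperationListEngine MultiOperationListEngine MultiOperationListEngine_alt
  simp only []
  have hnpos : 0 < input_list.length := List.length_pos_iff.mpr hpre
  have h0 : 0 ≤ PySem.Int.mod k (input_list.length : Int) :=
    PySem.Int.mod_nonneg k (by exact_mod_cast hnpos)
  have hlt : PySem.Int.mod k (input_list.length : Int) < (input_list.length : Int) :=
    PySem.Int.mod_lt k (by exact_mod_cast hnpos)
  rw [sliceRot_eq input_list _ h0 hlt, rot_eq input_list _ hpre h0 hlt]
  set R := input_list.drop (input_list.length - (PySem.Int.mod k (input_list.length : Int)).toNat) ++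
           input_list.take (input_list.length - (PySem.Int.mod k (input_list.length : Int)).toNat) with hR
  have hRlen : R.length = input_list.length := by
    simp [hR]
  rw [aFold_dedup R]
  have hd0 : ∀ v : Int,
      (R.foldl (fun (d : PySem.Dict Int Int) x => d.insert x (d.getD x 0 + 1))
        PySem.Dict.empty).getD v 0 = ((R.take R.length).count v : Int) := by
    intro v
    rw [PySem.Dict.getD_foldl_insert_add_one, PySem.Dict.getD_empty]
    simp
  have hb := bLoop_eq R R.length (le_refl _) _ hd0 [] []
  rw [show ((input_list.length : Int) - 1) = ((R.length : Int) - 1) from by rw [hRlen]]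
  rw [Prod.ext_iff] at hb
  rw [Prod.mk.injEq]
  constructor
  · rw [hb.1]
    simp [List.take_of_length_le (le_refl R.length)]
  · rw [hb.2]
    simp [List.take_of_length_le (le_refl R.length)]
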